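-- pv_equiv track=rewrite | github.com/steveway/papagayo-ng | breakdowns/sinhala_breakdown_rules/Schwa_Analysis.py | rule_seven
-- ===== SOURCE A (Python) =====
-- def rule_seven(word):
--     phones = word.strip(' ').strip('-').split('-')
--     trans = ''
--
--     for i in range(len(phones)):
--         phone = phones[i]
--
--         if len(phones) - i > 4:
--             if phone == 'k':
--                 next_phone = phones[i + 1]
--                 if next_phone == '@':
--                     nnext_phone = phones[i + 2]
--                     if nnext_phone == 'r' or nnext_phone == 'l':
--                         nnnext_phone = phones[i + 3]
--                         if nnnext_phone == 'u':
--                             phones[i + 1] = 'a'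
--
--     for phone in phones:
--         trans = trans + phone + '-'
--
--     return trans
-- ===== SOURCE B (Python) =====
-- def rule_seven(word):
--     phones = word.strip(' ').strip('-').split('-')
--     out = []
--     rest = phones
--     while rest:
--         if len(rest) >= 5 and rest[0] == 'k' and rest[1] == '@' and (rest[2] == 'r' or rest[2] == 'l') and rest[3] == 'u':
--             out += ['k', 'a', rest[2], 'u']
--             rest = rest[4:]
--         else:
--             out.append(rest[0])
--             rest = rest[1:]
--     return '-'.join(out) + '-'
-- ===== Notes on version B (the rewrite author's own statement) =====
-- stated objective: alternative
-- what changed: Replaces A's indexed range-loop that mutates the phone list in place (plus a second concatenation loop) by a single forward pass that consumes each whole matched five-token window at once, emitting the rewritten block, followed by a hyphen join.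
import Mathlib
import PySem

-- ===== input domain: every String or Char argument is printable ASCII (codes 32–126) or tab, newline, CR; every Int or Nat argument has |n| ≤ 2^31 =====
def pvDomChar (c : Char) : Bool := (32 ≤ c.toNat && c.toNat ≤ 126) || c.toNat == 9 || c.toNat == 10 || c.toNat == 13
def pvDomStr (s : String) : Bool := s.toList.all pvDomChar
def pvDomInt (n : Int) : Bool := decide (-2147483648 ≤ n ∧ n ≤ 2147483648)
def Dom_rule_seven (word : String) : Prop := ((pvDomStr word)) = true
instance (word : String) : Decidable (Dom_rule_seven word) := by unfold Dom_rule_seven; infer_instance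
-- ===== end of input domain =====

-- B replaces the in-place indexed mutation loop by a single consume-the-window pass plus a hyphen join (alternative decomposition, same cost).

-- ===== PORT A =====
-- loop body of A's 'for i in range(len(phones))' (reads are guarded in range exactly as in A)
def stepA (l : List String) (i : Nat) : List String :=
  if l.length - i > 4 then
    if l.getD i "" = "k" then
      if l.getD (i+1) "" = "@" then
        if l.getD (i+2) "" = "r" ∨ l.getD (i+2) "" = "l" then
          if l.getD (i+3) "" = "u" then l.set (i+1) "a" else l
        else l
      else l
    else l
  else l

def rule_seven (word : String) : String :=
  let phones := (PySem.Str.split? (PySem.Str.stripChars (PySem.Str.stripChars word " ") "-") "-").getD []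
  let phones := (List.range phones.length).foldl stepA phones
  phones.foldl (fun trans phone => trans ++ phone ++ "-") ""

-- ===== PORT B =====
-- B's while-loop: consume a matched five-token window (four rewritten tokens plus lookahead), else emit one token
def rwB : List String → List String
  | a :: b :: c :: d :: e :: rest =>
    if a = "k" ∧ b = "@" ∧ (c = "r" ∨ c = "l") ∧ d = "u" then
      "k" :: "a" :: c :: "u" :: rwB (e :: rest)
    else a :: rwB (b :: c :: d :: e :: rest)
  | a :: rest => a :: rwB rest
  | [] => []
termination_by l => l.length

def rule_seven_alt (word : String) : String :=
  let phones := (PySem.Str.split? (PySem.Str.stripChars (PySem.Str.stripChars word " ") "-") "-").getD []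
  PySem.Str.join "-" (rwB phones) ++ "-"

-- ===== PRECONDITION & SPEC =====
def Spec_rule_seven (word : String) (out : String) : Prop := out = rule_seven_alt word
instance (word : String) (out : String) : Decidable (Spec_rule_seven word out) := by unfold Spec_rule_seven; infer_instance

-- ===== CLAIM (what is proved, stated in full; the proofs are below) =====
def Claim_equal_rule_seven : Prop := ∀ (word : String), Dom_rule_seven word → Spec_rule_seven word (rule_seven word)

-- ===== LEMMAS AND PROOFS =====

theorem go_ne_nil (sep : List Char) : ∀ (fuel : Nat) (l cur : List Char) (acc : List (List Char)),
    PySem.Chars.splitOn.go sep fuel l cur acc ≠ [] := by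
  intro fuel
  induction fuel with
  | zero => intro l cur acc; simp [PySem.Chars.splitOn.go]
  | succ n ih =>
    intro l cur acc
    cases l with
    | nil => simp [PySem.Chars.splitOn.go]
    | cons c rest =>
      rw [PySem.Chars.splitOn.go]
      split
      · exact ih _ _ _
      · exact ih _ _ _

theorem rwB_ne_nil (l : List String) (h : l ≠ []) : rwB l ≠ [] := by
  rcases l with _ | ⟨a, _ | ⟨b, _ | ⟨c, _ | ⟨d, _ | ⟨e, rest⟩⟩⟩⟩⟩
  · exact absurd rfl h
  · simp [rwB]
  · simp [rwB]
  · simp [rwB]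
  · simp [rwB]
  · rw [rwB]; split <;> simp

theorem rwB_cons_short (x : String) (xs : List String) (h : xs.length < 4) :
    rwB (x :: xs) = x :: rwB xs := by
  rcases xs with _ | ⟨b, _ | ⟨c, _ | ⟨d, _ | ⟨e, rest⟩⟩⟩⟩
  · simp [rwB]
  · simp [rwB]
  · simp [rwB]
  · simp [rwB]
  · simp at h; omega

theorem rwB_cons_fail (x b c d e : String) (rest : List String)
    (h : ¬ (x = "k" ∧ b = "@" ∧ (c = "r" ∨ c = "l") ∧ d = "u")) :
    rwB (x :: b :: c :: d :: e :: rest) = x :: rwB (b :: c :: d :: e :: rest) := by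
  rw [rwB, if_neg h]

theorem rwB_cons_ne_k (x : String) (xs : List String) (h : x ≠ "k") :
    rwB (x :: xs) = x :: rwB xs := by
  rcases xs with _ | ⟨b, _ | ⟨c, _ | ⟨d, _ | ⟨e, rest⟩⟩⟩⟩
  · simp [rwB]
  · simp [rwB]
  · simp [rwB]
  · simp [rwB]
  · exact rwB_cons_fail _ _ _ _ _ _ (by tauto)

theorem rwB_cons_pos (c e : String) (rest : List String) (hc : c = "r" ∨ c = "l") :
    rwB ("k" :: "@" :: c :: "u" :: e :: rest) = "k" :: "a" :: c :: "u" :: rwB (e :: rest) := by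
  rw [rwB, if_pos ⟨rfl, rfl, hc, rfl⟩]

theorem getD_drop (l : List String) (i k : Nat) :
    l.getD (i + k) "" = (l.drop i).getD k "" := by
  simp [List.getD, List.getElem?_drop]

-- the main invariant: scanning indices i, i+1, … over l equals rewriting the suffix l.drop i
theorem scan_aux : ∀ (m i : Nat) (l : List String), m = l.length - i →
    (List.range' i m).foldl stepA l = l.take i ++ rwB (l.drop i) := by
  intro m
  induction m with
  | zero =>
    intro i l hm
    have hle : l.length ≤ i := by omega
    simp [List.drop_eq_nil_of_le hle, List.take_of_length_le hle, rwB]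
  | succ n ih =>
    intro i l hm
    have hi : i < l.length := by omega
    rw [List.range'_succ, List.foldl_cons]
    by_cases hC : 4 < l.length - i ∧ l.getD i "" = "k" ∧ l.getD (i+1) "" = "@" ∧
        (l.getD (i+2) "" = "r" ∨ l.getD (i+2) "" = "l") ∧ l.getD (i+3) "" = "u"
    · -- a match at i: A sets index i+1, B rewrites the window
      obtain ⟨hlen, h0, h1, h2, h3⟩ := hC
      have hstep : stepA l i = l.set (i+1) "a" := by
        unfold stepA
        rw [if_pos hlen, if_pos h0, if_pos h1, if_pos h2, if_pos h3]
      have hdlen : 5 ≤ (l.drop i).length := by simp; omega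
      rcases hd : l.drop i with _ | ⟨a, _ | ⟨b, _ | ⟨c, _ | ⟨d, _ | ⟨e, rest⟩⟩⟩⟩⟩ <;>
        rw [hd] at hdlen <;> simp at hdlen
      have hg : ∀ k, l.getD (i + k) "" = (a :: b :: c :: d :: e :: rest).getD k "" := by
        intro k; rw [getD_drop, hd]
      have ha : a = "k" := by
        have t := hg 0; simp only [Nat.add_zero] at t; rw [t] at h0; simpa using h0
      have hb : b = "@" := by have t := hg 1; rw [t] at h1; simpa using h1
      have hc : c = "r" ∨ c = "l" := by have t := hg 2; rw [t] at h2; simpa using h2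
      have hdu : d = "u" := by have t := hg 3; rw [t] at h3; simpa using h3
      subst ha hb hdu
      rw [hstep]
      set l' := l.set (i+1) "a" with hl'
      have ihv := ih (i+1) l' (by simp [hl']; omega)
      rw [ihv]
      have hdrop1 : l.drop (i+1) = "@" :: c :: "u" :: e :: rest := by
        rw [← List.tail_drop, hd]; rfl
      have hdrop' : l'.drop (i+1) = "a" :: c :: "u" :: e :: rest := by
        rw [hl', List.drop_set]
        simp [hdrop1]
      have hgetl : l[i]? = some "k" := by
        have t : (l.drop i)[0]? = l[i]? := by simp [List.getElem?_drop]
        rw [hd] at t; simpa using t.symm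
      have hget : l'[i]? = some "k" := by
        rw [hl', List.getElem?_set_ne (by omega)]; exact hgetl
      have htake : l'.take (i+1) = l.take i ++ ["k"] := by
        rw [List.take_add_one, hget]
        have ht : l'.take i = l.take i := by
          rw [hl', List.take_set]
          exact List.set_eq_of_length_le (by simp only [List.length_take]; omega)
        rw [ht]; rfl
      rw [htake, hdrop', rwB_cons_pos c e rest hc,
        rwB_cons_ne_k "a" _ (by decide), rwB_cons_ne_k c _ (by rcases hc with h | h <;> simp [h]),
        rwB_cons_ne_k "u" _ (by decide)]
      simp only [List.append_assoc, List.singleton_append]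
    · -- no match at i: A leaves l unchanged, B emits one token
      have hstep : stepA l i = l := by
        unfold stepA
        split_ifs with h1 h2 h3 h4 h5
        · exact absurd ⟨h1, h2, h3, h4, h5⟩ hC
        all_goals rfl
      rw [hstep, ih (i+1) l (by omega)]
      have hd : l.drop i = l[i] :: l.drop (i+1) := List.drop_eq_getElem_cons hi
      have htake : l.take (i+1) = l.take i ++ [l[i]] := by
        rw [List.take_add_one, List.getElem?_eq_getElem hi]; rfl
      have hx : l.getD i "" = l[i] := by simp [List.getD, List.getElem?_eq_getElem hi]
      rw [htake, hd]
      suffices hs : rwB (l[i] :: l.drop (i+1)) = l[i] :: rwB (l.drop (i+1)) by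
        rw [hs]
        simp only [List.append_assoc, List.singleton_append]
      by_cases hlen : 4 < l.length - i
      · have hdl : (l.drop (i+1)).length = l.length - (i+1) := by simp
        rcases he : l.drop (i+1) with _ | ⟨b, _ | ⟨c, _ | ⟨d, _ | ⟨e, rest⟩⟩⟩⟩ <;>
          rw [he] at hdl <;> simp at hdl <;> try omega
        have hg : ∀ k, l.getD (i + 1 + k) "" = (b :: c :: d :: e :: rest).getD k "" := by
          intro k; rw [getD_drop, he]
        have hb : l.getD (i+1) "" = b := by have t := hg 0; simpa using t
        have hcv : l.getD (i+2) "" = c := by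
          have t := hg 1; rw [show i + 1 + 1 = i + 2 by omega] at t; simpa using t
        have hdv : l.getD (i+3) "" = d := by
          have t := hg 2; rw [show i + 1 + 2 = i + 3 by omega] at t; simpa using t
        refine rwB_cons_fail _ _ _ _ _ _ ?_
        rintro ⟨e1, e2, e3, e4⟩
        exact hC ⟨hlen, by rw [hx]; exact e1, by rw [hb]; exact e2,
          by rw [hcv]; exact e3, by rw [hdv]; exact e4⟩
      · refine rwB_cons_short _ _ ?_
        have hdl : (l.drop (i+1)).length = l.length - (i+1) := by simp
        omega

-- the final concatenation loop of A, char-list level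
theorem foldl_dash_chars (L : List (List Char)) (s : List Char) :
    L.foldl (fun t p => t ++ p ++ ['-']) s = s ++ (L.map (· ++ ['-'])).flatten := by
  induction L generalizing s with
  | nil => simp
  | cons a t ih => simp

theorem flatten_dash_eq_intercalate : ∀ (L : List (List Char)), L ≠ [] →
    (L.map (· ++ ['-'])).flatten = List.intercalate ['-'] L ++ ['-'] := by
  intro L
  induction L with
  | nil => simp
  | cons a t ih =>
    intro _
    cases t with
    | nil => simp [List.intercalate]
    | cons b t' =>
      have hstep : List.intercalate ['-'] (a :: b :: t') =
          a ++ ['-'] ++ List.intercalate ['-'] (b :: t') := by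
        simp [List.intercalate, List.intersperse]
      have hfl : (List.map (· ++ ['-']) (a :: b :: t')).flatten
          = (a ++ ['-']) ++ (List.map (· ++ ['-']) (b :: t')).flatten := by
        simp
      rw [hfl, ih (by simp), hstep]
      simp

theorem foldl_dash_str (L : List String) (s : String) :
    (L.foldl (fun t p => t ++ p ++ "-") s).toList
      = (L.map String.toList).foldl (fun t p => t ++ p ++ ['-']) s.toList := by
  induction L generalizing s with
  | nil => rfl
  | cons a t ih => simp [ih]

theorem phones_ne_nil (w : String) :
    ((PySem.Str.split? w "-").getD []) ≠ [] := by
  simp only [PySem.Str.split?, PySem.Chars.split?]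
  rw [if_neg (by decide)]
  simp only [Option.map_some, Option.getD_some, ne_eq, List.map_eq_nil_iff]
  exact go_ne_nil _ _ _ _ _

theorem body_eq (phones : List String) (hne : phones ≠ []) :
    ((List.range phones.length).foldl stepA phones).foldl (fun t p => t ++ p ++ "-") ""
      = PySem.Str.join "-" (rwB phones) ++ "-" := by
  have hscan : (List.range phones.length).foldl stepA phones = rwB phones := by
    rw [List.range_eq_range', scan_aux phones.length 0 phones (by simp)]
    simp
  rw [hscan]
  apply String.toList_injective
  rw [foldl_dash_str, String.toList_append, PySem.Str.toList_join]
  rw [foldl_dash_chars, flatten_dash_eq_intercalate _ (by simpa using rwB_ne_nil _ hne)]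
  simp [PySem.Chars.join]

-- ===== VERDICT (by name: the statement is the Claim_ definition above) =====
theorem rule_seven_spec : Claim_equal_rule_seven := by
  intro word _
  show rule_seven word = rule_seven_alt word
  unfold rule_seven rule_seven_alt
  exact body_eq _ (phones_ne_nil _)
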